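-- pv_equiv track=rewrite | github.com/mohitRohatgi/what_who_when | main.py | separate_cases
-- ===== SOURCE A (Python) =====
-- def separate_cases(questions, labels):
--     rare_indices = []
--     what_indices = []
--     who_indices = []
--     when_indices = []
--     affirmation_indices = []
--     unknown_indices = []
--     word_array = []
--     for question in questions:
--         word_array.append(question.split(" "))
--     for index, row in enumerate(word_array):
--         first_word = row[0].lower().strip()
--         if first_word != labels[index].lower().strip() and first_word in labels:
--             rare_indices.append(index)
--         elif labels[index] == 'what':
--             what_indices.append(index)
--         elif labels[index] == 'who':
--             who_indices.append(index)
--         elif labels[index] == 'when':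
--             when_indices.append(index)
--         elif labels[index] == 'affirmation':
--             affirmation_indices.append(index)
--         elif labels[index] == 'unknown':
--             unknown_indices.append(index)
--
--     return [rare_indices, what_indices, who_indices, when_indices,
--             affirmation_indices, unknown_indices]
-- ===== SOURCE B (Python) =====
-- def separate_cases(questions, labels):
--     def first_word(q):
--         return q.split(" ")[0].lower().strip()
--     n = len(questions)
--     rare_set = {i for i in range(n)
--                 if first_word(questions[i]) != labels[i].lower().strip()
--                 and first_word(questions[i]) in labels}
--     rare_indices = sorted(rare_set)
--     buckets = [[i for i in range(n) if i not in rare_set and labels[i] == cat]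
--                for cat in ('what', 'who', 'when', 'affirmation', 'unknown')]
--     return [rare_indices] + buckets
-- ===== Notes on version B (the rewrite author's own statement) =====
-- stated objective: alternative
-- what changed: A's single loop that classifies each index and appends into one of six accumulators is replaced by a precomputed rare-index set followed by five independent per-category filtering passes over range(len(questions)).
import Mathlib
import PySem

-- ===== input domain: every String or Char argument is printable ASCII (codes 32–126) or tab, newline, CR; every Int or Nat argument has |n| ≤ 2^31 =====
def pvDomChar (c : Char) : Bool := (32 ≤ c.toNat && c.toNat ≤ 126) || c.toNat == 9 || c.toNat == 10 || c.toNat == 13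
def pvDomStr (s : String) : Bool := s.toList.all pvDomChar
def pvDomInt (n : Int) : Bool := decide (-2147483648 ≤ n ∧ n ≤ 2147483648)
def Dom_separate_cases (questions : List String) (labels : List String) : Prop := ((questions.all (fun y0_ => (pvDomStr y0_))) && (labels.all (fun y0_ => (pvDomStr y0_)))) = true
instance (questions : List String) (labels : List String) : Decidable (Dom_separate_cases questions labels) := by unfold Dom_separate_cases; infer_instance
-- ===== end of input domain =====

-- B replaces A's single six-way classify-and-append loop by a precomputed rare-index set
-- plus five independent per-category filtering passes (objective: alternative decomposition).


-- ===== PORT A =====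
def separate_cases (questions : List String) (labels : List String) : List (List Int) :=
  -- word_array: question.split(" ") — the separator " " is a nonempty literal, so split? is always `some`
  let word_array : List (List String) :=
    questions.foldl (fun acc q => acc ++ [(PySem.Str.split? q " ").getD []]) []
  let r :=
    (PySem.List.enumerate word_array).foldl (fun s p =>
      -- row[0]: str.split(" ") never returns an empty list, so the default "" is never used
      let first_word := PySem.Str.strip (PySem.Str.lower (PySem.List.pyGetD p.2 0 ""))
      -- labels[index]: in range under Pre_; the default "" is only reached outside Pre_
      let lab := PySem.List.pyGetD labels p.1 ""
      if first_word != PySem.Str.strip (PySem.Str.lower lab) && labels.contains first_word then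
        (s.1 ++ [p.1], s.2.1, s.2.2.1, s.2.2.2.1, s.2.2.2.2.1, s.2.2.2.2.2)
      else if lab == "what" then
        (s.1, s.2.1 ++ [p.1], s.2.2.1, s.2.2.2.1, s.2.2.2.2.1, s.2.2.2.2.2)
      else if lab == "who" then
        (s.1, s.2.1, s.2.2.1 ++ [p.1], s.2.2.2.1, s.2.2.2.2.1, s.2.2.2.2.2)
      else if lab == "when" then
        (s.1, s.2.1, s.2.2.1, s.2.2.2.1 ++ [p.1], s.2.2.2.2.1, s.2.2.2.2.2)
      else if lab == "affirmation" then
        (s.1, s.2.1, s.2.2.1, s.2.2.2.1, s.2.2.2.2.1 ++ [p.1], s.2.2.2.2.2)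
      else if lab == "unknown" then
        (s.1, s.2.1, s.2.2.1, s.2.2.2.1, s.2.2.2.2.1, s.2.2.2.2.2 ++ [p.1])
      else s)
      (([], [], [], [], [], []) :
        List Int × List Int × List Int × List Int × List Int × List Int)
  [r.1, r.2.1, r.2.2.1, r.2.2.2.1, r.2.2.2.2.1, r.2.2.2.2.2]

-- ===== PORT B =====
-- first_word(q) = q.split(" ")[0].lower().strip()  (split(" ") never yields an empty list)
def pvFirstWord (q : String) : String :=
  PySem.Str.strip (PySem.Str.lower (PySem.List.pyGetD ((PySem.Str.split? q " ").getD []) 0 ""))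

-- the rare-set comprehension condition at index i
def pvRareB (questions : List String) (labels : List String) (i : Int) : Bool :=
  pvFirstWord (PySem.List.pyGetD questions i "")
      != PySem.Str.strip (PySem.Str.lower (PySem.List.pyGetD labels i ""))
    && labels.contains (pvFirstWord (PySem.List.pyGetD questions i ""))

def separate_cases_alt (questions : List String) (labels : List String) : List (List Int) :=
  let n : Int := PySem.List.len questions
  let rareSet : PySem.Set Int :=
    PySem.Set.ofList ((PySem.List.pyRange 0 n).filter (pvRareB questions labels))
  let rare_indices := PySem.List.sorted rareSet (fun x => x)
  let bucket := fun (c : String) =>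
    (PySem.List.pyRange 0 n).filter
      (fun i => !(PySem.Set.contains rareSet i) && PySem.List.pyGetD labels i "" == c)
  [rare_indices, bucket "what", bucket "who", bucket "when", bucket "affirmation", bucket "unknown"]

-- ===== PRECONDITION & SPEC =====
-- Python A evaluates labels[index] for every question index, raising IndexError iff labels is shorter.
def Pre_separate_cases (questions : List String) (labels : List String) : Prop :=
  questions.length ≤ labels.length
instance (questions : List String) (labels : List String) : Decidable (Pre_separate_cases questions labels) := by unfold Pre_separate_cases; infer_instance
def pvWitness_separate_cases : List String × List String :=
  (["what is this", "who am i", "when now"], ["what", "who", "when"])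

def Spec_separate_cases (questions : List String) (labels : List String) (out : List (List Int)) : Prop := out = separate_cases_alt questions labels
instance (questions : List String) (labels : List String) (out : List (List Int)) : Decidable (Spec_separate_cases questions labels out) := by unfold Spec_separate_cases; infer_instance

-- ===== CLAIM (what is proved, stated in full; the proofs are below) =====
def Claim_equal_separate_cases : Prop := ∀ (questions : List String) (labels : List String), Dom_separate_cases questions labels → Pre_separate_cases questions labels → Spec_separate_cases questions labels (separate_cases questions labels)

-- ===== LEMMAS AND PROOFS =====

-- scratch lemmas v2
def pvC1 (labels : List String) (p : Int × List String) : Bool :=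
  PySem.Str.strip (PySem.Str.lower (PySem.List.pyGetD p.2 0 ""))
      != PySem.Str.strip (PySem.Str.lower (PySem.List.pyGetD labels p.1 ""))
    && labels.contains (PySem.Str.strip (PySem.Str.lower (PySem.List.pyGetD p.2 0 "")))

def pvCat (labels : List String) (c : String) (p : Int × List String) : Bool :=
  !pvC1 labels p && (PySem.List.pyGetD labels p.1 "" == c)

theorem pvFold_eq (labels : List String)
    (f : (List Int × List Int × List Int × List Int × List Int × List Int) →
         (Int × List String) →
         (List Int × List Int × List Int × List Int × List Int × List Int))
    (hf : ∀ s p, f s p =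
      (if pvC1 labels p then s.1 ++ [p.1] else s.1,
       if pvCat labels "what" p then s.2.1 ++ [p.1] else s.2.1,
       if pvCat labels "who" p then s.2.2.1 ++ [p.1] else s.2.2.1,
       if pvCat labels "when" p then s.2.2.2.1 ++ [p.1] else s.2.2.2.1,
       if pvCat labels "affirmation" p then s.2.2.2.2.1 ++ [p.1] else s.2.2.2.2.1,
       if pvCat labels "unknown" p then s.2.2.2.2.2 ++ [p.1] else s.2.2.2.2.2))
    (l : List (Int × List String)) (a1 a2 a3 a4 a5 a6 : List Int) :
    l.foldl f (a1, a2, a3, a4, a5, a6)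
    = (a1 ++ (l.filter (pvC1 labels)).map (·.1),
       a2 ++ (l.filter (pvCat labels "what")).map (·.1),
       a3 ++ (l.filter (pvCat labels "who")).map (·.1),
       a4 ++ (l.filter (pvCat labels "when")).map (·.1),
       a5 ++ (l.filter (pvCat labels "affirmation")).map (·.1),
       a6 ++ (l.filter (pvCat labels "unknown")).map (·.1)) := by
  induction l generalizing a1 a2 a3 a4 a5 a6 with
  | nil => simp
  | cons p t ih =>
    rw [List.foldl_cons, hf, ih]
    refine Prod.ext ?_ (Prod.ext ?_ (Prod.ext ?_ (Prod.ext ?_ (Prod.ext ?_ ?_)))) <;>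
      simp only [List.filter_cons]
    · by_cases h : pvC1 labels p <;> simp [h]
    · by_cases h : pvCat labels "what" p <;> simp [h]
    · by_cases h : pvCat labels "who" p <;> simp [h]
    · by_cases h : pvCat labels "when" p <;> simp [h]
    · by_cases h : pvCat labels "affirmation" p <;> simp [h]
    · by_cases h : pvCat labels "unknown" p <;> simp [h]


-- bridge: mapping the index out of the filtered enumeration is a filter over range(n)
theorem pvEnumFilter (questions : List String) (c : (Int × List String) → Bool) :
    List.map (fun x => x.1) (List.filter c
      (PySem.List.enumerate (questions.map (fun q => (PySem.Str.split? q " ").getD [])))) =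
    (PySem.List.pyRange 0 (PySem.List.len questions)).filter
      (fun j => c (j, (PySem.Str.split? (PySem.List.pyGetD questions j "") " ").getD [])) := by
  rw [PySem.List.enumerate_eq_map_pyRange _ ((PySem.Str.split? "" " ").getD [])]
  have hlen : PySem.List.len (questions.map (fun q => (PySem.Str.split? q " ").getD []))
      = PySem.List.len questions := by simp [PySem.List.len]
  rw [hlen, List.filter_map, List.map_map]
  have : ∀ j : Int, PySem.List.pyGetD (questions.map (fun q => (PySem.Str.split? q " ").getD []))
      j ((PySem.Str.split? "" " ").getD [])
      = (PySem.Str.split? (PySem.List.pyGetD questions j "") " ").getD [] := by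
    intro j
    exact PySem.List.pyGetD_map (fun q => (PySem.Str.split? q " ").getD []) questions j ""
  simp only [Function.comp_def, this]
  rw [List.map_id']

theorem pvRareFilter (questions labels : List String) :
    (PySem.List.pyRange 0 (PySem.List.len questions)).filter
      (fun j => pvC1 labels (j, (PySem.Str.split? (PySem.List.pyGetD questions j "") " ").getD []))
    = (PySem.List.pyRange 0 (PySem.List.len questions)).filter (pvRareB questions labels) := by
  apply List.filter_congr
  intro i _
  simp [pvC1, pvRareB, pvFirstWord]

theorem pvPairwiseRange (n : Nat) : (PySem.List.pyRange 0 (n : Int)).Pairwise (· < ·) := by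
  rw [PySem.List.pyRange_zero_natCast]
  exact (List.pairwise_lt_range).map _ (by intro a b h; exact_mod_cast h)

theorem pvSortedRare (questions labels : List String) :
    PySem.List.sorted (PySem.Set.ofList
        ((PySem.List.pyRange 0 (PySem.List.len questions)).filter (pvRareB questions labels)))
        (fun x => x)
    = (PySem.List.pyRange 0 (PySem.List.len questions)).filter (pvRareB questions labels) := by
  have hlen : PySem.List.len questions = ((questions.length : Nat) : Int) := by
    simp [PySem.List.len]
  have hpw : ((PySem.List.pyRange 0 (PySem.List.len questions)).filter
      (pvRareB questions labels)).Pairwise (· < ·) := by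
    rw [hlen]; exact (pvPairwiseRange questions.length).filter _
  have hnd : ((PySem.List.pyRange 0 (PySem.List.len questions)).filter
      (pvRareB questions labels)).Nodup := hpw.imp (fun h => ne_of_lt h)
  rw [PySem.Set.ofList_eq_self_of_nodup _ hnd]
  exact PySem.List.sorted_eq_of_perm_of_pairwise_lt _ _ _ (List.Perm.refl _) hpw

theorem pvBucket (questions labels : List String) (c : String) :
    (PySem.List.pyRange 0 (PySem.List.len questions)).filter
      (fun j => pvCat labels c (j, (PySem.Str.split? (PySem.List.pyGetD questions j "") " ").getD []))
    = (PySem.List.pyRange 0 (PySem.List.len questions)).filter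
        (fun i => !(PySem.Set.contains (PySem.Set.ofList
            ((PySem.List.pyRange 0 (PySem.List.len questions)).filter (pvRareB questions labels))) i)
          && (PySem.List.pyGetD labels i "" == c)) := by
  apply List.filter_congr
  intro i hi
  have hc : PySem.Set.contains (PySem.Set.ofList
      ((PySem.List.pyRange 0 (PySem.List.len questions)).filter (pvRareB questions labels))) i
      = pvRareB questions labels i := by
    cases hb : pvRareB questions labels i
    · rw [Bool.eq_false_iff]
      intro hcon
      have := (PySem.Set.contains_iff _ _).mp hcon
      rw [PySem.Set.mem_ofList, List.mem_filter] at this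
      simp [hb] at this
    · exact (PySem.Set.contains_iff _ _).mpr
        ((PySem.Set.mem_ofList _ _).mpr (List.mem_filter.mpr ⟨hi, hb⟩))
  rw [hc]
  simp [pvCat, pvC1, pvRareB, pvFirstWord]

theorem pvMain (questions labels : List String) :
    separate_cases questions labels = separate_cases_alt questions labels := by
  unfold separate_cases separate_cases_alt
  simp only [PySem.List.foldl_append_singleton_eq_map, List.nil_append]
  rw [pvFold_eq labels _ ?hf]
  case hf =>
    intro s p
    simp only [pvC1, pvCat]
    split_ifs with h1 h2 h3 h4 h5 h6 <;> simp_all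
  simp only [List.nil_append, pvEnumFilter]
  rw [pvRareFilter, pvSortedRare, pvBucket, pvBucket, pvBucket, pvBucket, pvBucket]

-- ===== VERDICT (by name: the statement is the Claim_ definition above) =====
theorem separate_cases_spec : Claim_equal_separate_cases := by
  intro questions labels _ _
  exact pvMain questions labels
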